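-- pv_equiv track=rewrite | github.com/paiml/depyler | examples/hard_sorting_searching.py | naive_pattern_match
-- ===== SOURCE A (Python) =====
-- def naive_pattern_match(text: list[int], pattern: list[int]) -> list[int]:
--     """Find all starting indices where pattern appears in text."""
--     result: list[int] = []
--     n: int = len(text)
--     m: int = len(pattern)
--     if m == 0 or m > n:
--         return result
--     i: int = 0
--     while i <= n - m:
--         match: bool = True
--         j: int = 0
--         while j < m:
--             if text[i + j] != pattern[j]:
--                 match = False
--                 break
--             j += 1
--         if match:
--             result.append(i)
--         i += 1
--     return result
-- ===== SOURCE B (Python) =====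
-- def naive_pattern_match(text: list[int], pattern: list[int]) -> list[int]:
--     """Find all starting indices where pattern appears in text (Rabin-Karp rolling hash)."""
--     n = len(text)
--     m = len(pattern)
--     if m == 0 or m > n:
--         return []
--     MOD = (1 << 61) - 1
--     BASE = 1 << 32
--     OFF = 1 << 31
--     tmod = 0
--     for x in pattern:
--         tmod = (tmod * BASE + x + OFF) % MOD
--     h = 0
--     for x in text[:m]:
--         h = (h * BASE + x + OFF) % MOD
--     power = pow(BASE, m - 1, MOD)
--     res = []
--     if h == tmod and text[0:m] == pattern:
--         res.append(0)
--     for i in range(1, n - m + 1):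
--         h = ((h - (text[i - 1] + OFF) * power) * BASE + text[i + m - 1] + OFF) % MOD
--         if h == tmod and text[i:i + m] == pattern:
--             res.append(i)
--     return res
-- ===== Notes on version B (the rewrite author's own statement) =====
-- stated objective: alternative
-- what changed: Replaces A's nested position-by-position comparison loops with a Rabin-Karp scan: a rolling polynomial hash (mod 2^61-1) updated in O(1) per position pre-screens candidate positions, and the full window comparison runs only on a hash hit.
import Mathlib
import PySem

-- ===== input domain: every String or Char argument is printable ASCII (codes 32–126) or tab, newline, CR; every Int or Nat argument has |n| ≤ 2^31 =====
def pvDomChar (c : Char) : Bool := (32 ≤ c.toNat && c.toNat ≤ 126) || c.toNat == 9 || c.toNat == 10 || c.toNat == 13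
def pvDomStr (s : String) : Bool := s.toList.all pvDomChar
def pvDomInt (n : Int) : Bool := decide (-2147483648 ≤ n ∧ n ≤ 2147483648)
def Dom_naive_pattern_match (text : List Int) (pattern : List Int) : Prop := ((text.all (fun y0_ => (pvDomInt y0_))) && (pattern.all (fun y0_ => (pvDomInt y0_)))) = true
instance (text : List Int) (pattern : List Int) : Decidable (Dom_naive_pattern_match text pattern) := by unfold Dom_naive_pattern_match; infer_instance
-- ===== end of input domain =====

-- B replaces A's nested position-by-position comparison with a Rabin-Karp rolling hash
-- (candidate positions are pre-screened by an O(1)-updated hash, compared in full only on a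
-- hash hit); objective: alternative algorithm, exact same results.

-- ===== PORT A =====
-- inner 'while j < m' loop of A; fuel counts the remaining iterations (m - j)
def npmInner (text pattern : List Int) (m i : Int) (j : Int) : Nat → Bool
  | 0 => true
  | fuel + 1 =>
    if j < m then
      if PySem.List.pyGetD text (i + j) 0 ≠ PySem.List.pyGetD pattern j 0 then false
      else npmInner text pattern m i (j + 1) fuel
    else true

-- outer 'while i <= n - m' loop of A; fuel counts the remaining iterations
def npmOuter (text pattern : List Int) (n m : Int) : Int → List Int → Nat → List Int
  | _, result, 0 => result
  | i, result, fuel + 1 =>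
    if i ≤ n - m then
      let mtch := npmInner text pattern m i 0 m.toNat
      npmOuter text pattern n m (i + 1) (if mtch then result ++ [i] else result) fuel
    else result

def naive_pattern_match (text : List Int) (pattern : List Int) : List Int :=
  let n : Int := text.length
  let m : Int := pattern.length
  if m = 0 ∨ m > n then []
  else npmOuter text pattern n m 0 [] (n - m + 1).toNat

-- ===== PORT B =====
-- the 'for i in range(1, n - m + 1)' loop of B; fuel = number of iterations, i the loop index
def altLoop (text pattern : List Int) (m MOD BASE OFF tmod power : Int) :
    Int → Int → List Int → Nat → List Int
  | _, _, res, 0 => res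
  | i, h, res, fuel + 1 =>
    let h' := PySem.Int.mod
      ((h - (PySem.List.pyGetD text (i - 1) 0 + OFF) * power) * BASE
        + PySem.List.pyGetD text (i + m - 1) 0 + OFF) MOD
    let res' := if h' = tmod ∧ PySem.List.slice text (some i) (some (i + m)) = pattern
      then res ++ [i] else res
    altLoop text pattern m MOD BASE OFF tmod power (i + 1) h' res' fuel

def naive_pattern_match_alt (text : List Int) (pattern : List Int) : List Int :=
  let n : Int := text.length
  let m : Int := pattern.length
  if m = 0 ∨ m > n then []
  else
    let MOD : Int := 2305843009213693951
    let BASE : Int := 4294967296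
    let OFF : Int := 2147483648
    let tmod := pattern.foldl (fun h x => PySem.Int.mod (h * BASE + x + OFF) MOD) 0
    let h := (PySem.List.slice text none (some m)).foldl
      (fun h x => PySem.Int.mod (h * BASE + x + OFF) MOD) 0
    let power := PySem.Int.powMod BASE (m - 1).toNat MOD
    let res : List Int :=
      if h = tmod ∧ PySem.List.slice text (some 0) (some m) = pattern then [0] else []
    altLoop text pattern m MOD BASE OFF tmod power 1 h res (n - m).toNat

-- ===== PRECONDITION & SPEC =====
def Spec_naive_pattern_match (text : List Int) (pattern : List Int) (out : List Int) : Prop := out = naive_pattern_match_alt text pattern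
instance (text : List Int) (pattern : List Int) (out : List Int) : Decidable (Spec_naive_pattern_match text pattern out) := by unfold Spec_naive_pattern_match; infer_instance

-- ===== CLAIM (what is proved, stated in full; the proofs are below) =====
def Claim_equal_naive_pattern_match : Prop := ∀ (text : List Int) (pattern : List Int), Dom_naive_pattern_match text pattern → Spec_naive_pattern_match text pattern (naive_pattern_match text pattern)

-- ===== LEMMAS AND PROOFS =====

-- the exact (unreduced) polynomial encoding that B's modular hash tracks
def pureStep (h x : Int) : Int := h * 4294967296 + x + 2147483648
def pureEnc (l : List Int) : Int := l.foldl pureStep 0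

-- window predicate: pattern occurs at position k
def wpred (t p : List Int) (k : Nat) : Bool := decide ((t.drop k).take p.length = p)

-- both ports compute this normal form (for 0 < m ≤ n)
def pvSpec (t p : List Int) (i fuel : Nat) : List Int :=
  ((List.range' i fuel).filter (wpred t p)).map Int.ofNat

lemma pure_foldl_init (l : List Int) (a : Int) :
    l.foldl pureStep a = a * 4294967296 ^ l.length + l.foldl pureStep 0 := by
  induction l generalizing a with
  | nil => simp
  | cons x l ih =>
    simp only [List.foldl_cons, List.length_cons]
    rw [ih (pureStep a x), ih (pureStep 0 x)]
    simp only [pureStep]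
    ring

lemma pureEnc_append_singleton (l : List Int) (x : Int) :
    pureEnc (l ++ [x]) = pureEnc l * 4294967296 + x + 2147483648 := by
  simp [pureEnc, List.foldl_append, pureStep]

lemma mod_foldl (l : List Int) (a : Int) :
    l.foldl (fun h x => PySem.Int.mod (h * 4294967296 + x + 2147483648) 2305843009213693951)
      (a % 2305843009213693951)
      = (l.foldl pureStep a) % 2305843009213693951 := by
  induction l generalizing a with
  | nil => simp
  | cons x l ih =>
    simp only [List.foldl_cons]
    have hstep : PySem.Int.mod ((a % 2305843009213693951) * 4294967296 + x + 2147483648)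
        2305843009213693951 = (pureStep a x) % 2305843009213693951 := by
      rw [PySem.Int.mod_eq_emod_of_pos (by norm_num)]
      simp only [pureStep]
      conv_lhs => rw [add_assoc, Int.add_emod, Int.mul_emod,
        Int.emod_emod_of_dvd a dvd_rfl, ← Int.mul_emod, ← Int.add_emod, ← add_assoc]
    rw [hstep, ih (pureStep a x)]

-- rolling-hash step is exact on the unreduced encodings
lemma pure_roll (t : List Int) (m k : Nat) (hm : 0 < m) (hk : k + m < t.length) :
    pureEnc ((t.drop (k+1)).take m)
      = (pureEnc ((t.drop k).take m) - (t.getD k 0 + 2147483648) * 4294967296 ^ (m - 1))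
          * 4294967296 + t.getD (k+m) 0 + 2147483648 := by
  obtain ⟨m', rfl⟩ : ∃ m', m = m' + 1 := ⟨m - 1, by omega⟩
  have hk1 : k < t.length := by omega
  have hk2 : k + 1 + m' ≤ t.length := by omega
  have hmid : ((t.drop (k+1)).take m').length = m' := by
    simp [List.length_take]; omega
  have hWk : (t.drop k).take (m'+1) = t[k] :: (t.drop (k+1)).take m' := by
    rw [List.drop_eq_getElem_cons hk1, List.take_succ_cons]
  have hWk1 : (t.drop (k+1)).take (m'+1)
      = (t.drop (k+1)).take m' ++ [t[k+1+m']] := by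
    rw [List.take_add_one]
    have : (t.drop (k+1))[m']? = some t[k+1+m'] := by
      rw [List.getElem?_drop, List.getElem?_eq_getElem (by omega)]
    rw [this]
    simp
  have hcons : pureEnc (t[k] :: (t.drop (k+1)).take m')
      = (t[k] + 2147483648) * 4294967296 ^ m' + pureEnc ((t.drop (k+1)).take m') := by
    simp only [pureEnc, List.foldl_cons, pureStep]
    rw [pure_foldl_init, hmid]
    ring
  have hgk : t.getD k 0 = t[k] := List.getD_eq_getElem t 0 hk1
  have hgkm : t.getD (k+(m'+1)) 0 = t[k+1+m'] := by
    rw [show k + (m'+1) = k+1+m' from by omega]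
    exact List.getD_eq_getElem t 0 (by omega)
  rw [hWk, hWk1, pureEnc_append_singleton, hcons, hgk, hgkm]
  simp only [Nat.add_sub_cancel]
  ring

lemma npmInner_spec (t p : List Int) (i : Nat) :
    ∀ (fuel j : Nat), j + fuel = p.length → i + p.length ≤ t.length →
    npmInner t p p.length i j fuel
      = decide ((t.drop (i+j)).take fuel = (p.drop j).take fuel) := by
  intro fuel
  induction fuel with
  | zero => intro j h1 h2; simp [npmInner]
  | succ fuel ih =>
    intro j h1 h2
    have hj : j < p.length := by omega
    have hij : i + j < t.length := by omega
    have hcond : ((j:ℤ) < (p.length:ℤ)) := by exact_mod_cast hj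
    simp only [npmInner, if_pos hcond]
    have hga : PySem.List.pyGetD t ((i:ℤ) + (j:ℤ)) 0 = t[i+j] := by
      rw [show ((i:ℤ) + (j:ℤ)) = ((i+j : ℕ) : ℤ) from by push_cast; ring,
        PySem.List.pyGetD_natCast]
      exact List.getD_eq_getElem t 0 hij
    have hgb : PySem.List.pyGetD p ((j:ℤ)) 0 = p[j] := by
      rw [PySem.List.pyGetD_natCast]; exact List.getD_eq_getElem p 0 hj
    rw [hga, hgb]
    have hdt : (t.drop (i+j)).take (fuel+1) = t[i+j] :: (t.drop (i+j+1)).take fuel := by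
      rw [List.drop_eq_getElem_cons hij, List.take_succ_cons]
    have hdp : (p.drop j).take (fuel+1) = p[j] :: (p.drop (j+1)).take fuel := by
      rw [List.drop_eq_getElem_cons hj, List.take_succ_cons]
    rw [hdt, hdp]
    by_cases hx : t[i+j] = p[j]
    · rw [if_neg (by simpa using hx)]
      rw [show ((j:ℤ) + 1) = ((j+1 : ℕ) : ℤ) from by push_cast; ring,
        ih (j+1) (by omega) h2,
        show i + (j+1) = i + j + 1 from by omega]
      simp [hx]
    · rw [if_pos (by simpa using hx)]
      simp [hx]

lemma npmOuter_spec (t p : List Int) (hm : 0 < p.length) (hmn : p.length ≤ t.length) :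
    ∀ (fuel i : Nat) (res : List Int), i + fuel = t.length - p.length + 1 →
    npmOuter t p t.length p.length i res fuel = res ++ pvSpec t p i fuel := by
  intro fuel
  induction fuel with
  | zero => intro i res h; simp [npmOuter, pvSpec]
  | succ fuel ih =>
    intro i res h
    have hcond : ((i:ℤ) ≤ (t.length:ℤ) - (p.length:ℤ)) := by omega
    simp only [npmOuter, if_pos hcond]
    have hinner := npmInner_spec t p i p.length 0 (by omega) (by omega)
    simp only [Nat.cast_zero, List.drop_zero, List.take_length, add_zero] at hinner
    have htoNat : ((p.length : ℤ)).toNat = p.length := by omega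
    rw [htoNat, hinner]
    rw [show ((i:ℤ) + 1) = ((i+1 : ℕ) : ℤ) from by push_cast; ring,
      ih (i+1) _ (by omega)]
    by_cases hw : (t.drop i).take p.length = p
    · simp [pvSpec, List.range'_succ, wpred, hw]
    · simp [pvSpec, List.range'_succ, wpred, hw]

-- reducing the operands modulo M does not change a (x*B'+e)-style combination mod M
lemma mod_congr_step (X P d e B' : Int) :
    ((X % 2305843009213693951 - d * (P % 2305843009213693951)) * B' + e) % 2305843009213693951
      = ((X - d * P) * B' + e) % 2305843009213693951 := by
  have h1 : X % 2305843009213693951 ≡ X [ZMOD 2305843009213693951] :=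
    Int.emod_emod_of_dvd X dvd_rfl
  have h2 : P % 2305843009213693951 ≡ P [ZMOD 2305843009213693951] :=
    Int.emod_emod_of_dvd P dvd_rfl
  exact ((h1.sub (h2.mul_left d)).mul_right B').add_right e

lemma altLoop_spec (t p : List Int) (hm : 0 < p.length) (hmn : p.length ≤ t.length) :
    ∀ (fuel i : Nat) (res : List Int), 1 ≤ i → i + fuel = t.length - p.length + 1 →
    altLoop t p p.length 2305843009213693951 4294967296 2147483648
        (pureEnc p % 2305843009213693951)
        (PySem.Int.powMod 4294967296 ((p.length : Int) - 1).toNat 2305843009213693951)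
        i (pureEnc ((t.drop (i-1)).take p.length) % 2305843009213693951) res fuel
      = res ++ pvSpec t p i fuel := by
  intro fuel
  induction fuel with
  | zero => intro i res h1 h2; simp [altLoop, pvSpec]
  | succ fuel ih =>
    intro i res hi1 h2
    simp only [altLoop]
    have e1 : ((i:ℤ) - 1) = ((i-1 : ℕ) : ℤ) := by omega
    have e2 : ((i:ℤ) + (p.length:ℤ) - 1) = ((i+p.length-1 : ℕ) : ℤ) := by omega
    have htoNat : (((p.length:ℤ)) - 1).toNat = p.length - 1 := by omega
    have hroll := pure_roll t p.length (i-1) hm (by omega)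
    rw [show i - 1 + 1 = i from by omega, show i - 1 + p.length = i + p.length - 1 from by omega]
      at hroll
    have hH : PySem.Int.mod
        ((pureEnc ((t.drop (i-1)).take p.length) % 2305843009213693951
            - (PySem.List.pyGetD t ((i:ℤ) - 1) 0 + 2147483648)
              * PySem.Int.powMod 4294967296 (((p.length:ℤ)) - 1).toNat 2305843009213693951)
          * 4294967296 + PySem.List.pyGetD t ((i:ℤ) + (p.length:ℤ) - 1) 0 + 2147483648)
        2305843009213693951
        = pureEnc ((t.drop i).take p.length) % 2305843009213693951 := by
      rw [e1, e2, PySem.List.pyGetD_natCast, PySem.List.pyGetD_natCast, htoNat,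
        PySem.Int.powMod_eq_emod _ _ (by norm_num),
        PySem.Int.mod_eq_emod_of_pos (by norm_num), add_assoc, mod_congr_step,
        ← add_assoc, ← hroll]
    rw [hH, PySem.List.slice_natCast_add t i p.length]
    rw [show ((i:ℤ) + 1) = ((i+1 : ℕ) : ℤ) from by push_cast; ring]
    have ihi := fun (r : List ℤ) => ih (i+1) r (by omega) (by omega)
    simp only [Nat.add_sub_cancel] at ihi
    by_cases hw : (t.drop i).take p.length = p
    · have hcond : (pureEnc ((t.drop i).take p.length) % 2305843009213693951
          = pureEnc p % 2305843009213693951 ∧ (t.drop i).take p.length = p) := ⟨by rw [hw], hw⟩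
      rw [if_pos hcond, ihi (res ++ [(i:ℤ)])]
      simp [pvSpec, List.range'_succ, wpred, hw]
    · have hcond : ¬ (pureEnc ((t.drop i).take p.length) % 2305843009213693951
          = pureEnc p % 2305843009213693951 ∧ (t.drop i).take p.length = p) := by
        intro h; exact hw h.2
      rw [if_neg hcond, ihi res]
      simp [pvSpec, List.range'_succ, wpred, hw]

-- ===== VERDICT (by name: the statement is the Claim_ definition above) =====
theorem naive_pattern_match_spec : Claim_equal_naive_pattern_match := by
  unfold Claim_equal_naive_pattern_match Spec_naive_pattern_match
  intro t p _
  by_cases hguard : (p.length : ℤ) = 0 ∨ (p.length : ℤ) > (t.length : ℤ)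
  · simp only [naive_pattern_match, naive_pattern_match_alt, if_pos hguard]
  · simp only [naive_pattern_match, naive_pattern_match_alt, if_neg hguard]
    rw [not_or] at hguard
    obtain ⟨hg1, hg2⟩ := hguard
    have hm : 0 < p.length := by omega
    have hmn : p.length ≤ t.length := by omega
    -- A side
    have hA : ((t.length:ℤ) - (p.length:ℤ) + 1).toNat = t.length - p.length + 1 := by omega
    have hAspec := npmOuter_spec t p hm hmn (t.length - p.length + 1) 0 [] (by omega)
    simp only [Nat.cast_zero, List.nil_append] at hAspec
    rw [hA, hAspec]
    -- B side
    have hBfuel : ((t.length:ℤ) - (p.length:ℤ)).toNat = t.length - p.length := by omega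
    have htmod := mod_foldl p 0
    rw [Int.zero_emod] at htmod
    have hh0 := mod_foldl (t.take p.length) 0
    rw [Int.zero_emod] at hh0
    have hsl : PySem.List.slice t none (some ((p.length:ℤ))) = t.take p.length :=
      PySem.List.slice_to_natCast t p.length
    rw [hBfuel, hsl, htmod, hh0]
    by_cases hw : t.take p.length = p
    · have hcond : ((t.take p.length).foldl pureStep 0 % 2305843009213693951
          = p.foldl pureStep 0 % 2305843009213693951
          ∧ PySem.List.slice t (some 0) (some ((p.length:ℤ))) = p) := by
        constructor
        · rw [hw]
        · simpa [hsl] using hw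
      rw [if_pos hcond]
      have hBspec := altLoop_spec t p hm hmn (t.length - p.length) 1 [0] (by omega) (by omega)
      simp only [Nat.cast_one, Nat.sub_self] at hBspec
      simp only [pureEnc, List.drop_zero] at hBspec
      rw [hBspec]
      simp [pvSpec, List.range'_succ, wpred, List.drop_zero, hw]
    · have hcond : ¬ ((t.take p.length).foldl pureStep 0 % 2305843009213693951
          = p.foldl pureStep 0 % 2305843009213693951
          ∧ PySem.List.slice t (some 0) (some ((p.length:ℤ))) = p) := by
        intro h
        exact hw (by simpa [hsl] using h.2)
      rw [if_neg hcond]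
      have hBspec := altLoop_spec t p hm hmn (t.length - p.length) 1 [] (by omega) (by omega)
      simp only [Nat.cast_one, Nat.sub_self] at hBspec
      simp only [pureEnc, List.drop_zero] at hBspec
      rw [hBspec]
      simp [pvSpec, List.range'_succ, wpred, List.drop_zero, hw]
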